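-- pv_equiv track=rewrite | github.com/fishhead108/100daysOfCodeChallange | code/02/game.py | _get_permutations_draw
-- ===== SOURCE A (Python) =====
-- import itertools
--
-- NUM_LETTERS = 7
--
-- def _get_permutations_draw(draw):
--     """Helper for get_possible_dict_words to get all permutations of draw letters.
--     Hint: use itertools.permutations"""
--     # return [''.join(x) for x in itertools.permutations(draw)]
--     """
--     for i in range(1, 8):
--         yield from list(itertools.permutations(draw, i))
--     """
--     my_dict = []
--     for n in range(1, NUM_LETTERS + 1):
--         for xs in itertools.permutations(draw, n):
--             my_dict.append(''.join(xs))
--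
--     return my_dict
-- ===== SOURCE B (Python) =====
-- NUM_LETTERS = 7
--
-- def _get_permutations_draw(draw):
--     """Level-by-level permutation builder: each level extends the previous
--     partial permutations (string, remaining letters) by every remaining
--     element in order; the extension list is memoised per remaining tuple."""
--     out = []
--     level = [("", tuple(draw))]
--     for _ in range(NUM_LETTERS):
--         ext = {}
--         for _, r in level:
--             if r not in ext:
--                 ext[r] = [(r[i], r[:i] + r[i + 1:]) for i in range(len(r))]
--         level = [(s + x, r2) for s, r in level for x, r2 in ext[r]]
--         out += [s for s, _ in level]
--     return out
-- ===== Notes on version B (the rewrite author's own statement) =====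
-- stated objective: alternative
-- what changed: B drops itertools entirely: instead of running a fresh permutations(draw, n) scan for each length n, it keeps one list of partial permutations (string, remaining letters), extends it level by level seven times with a per-remaining-tuple memo of the extension lists, and collects each level's strings as it goes.
import Mathlib
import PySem

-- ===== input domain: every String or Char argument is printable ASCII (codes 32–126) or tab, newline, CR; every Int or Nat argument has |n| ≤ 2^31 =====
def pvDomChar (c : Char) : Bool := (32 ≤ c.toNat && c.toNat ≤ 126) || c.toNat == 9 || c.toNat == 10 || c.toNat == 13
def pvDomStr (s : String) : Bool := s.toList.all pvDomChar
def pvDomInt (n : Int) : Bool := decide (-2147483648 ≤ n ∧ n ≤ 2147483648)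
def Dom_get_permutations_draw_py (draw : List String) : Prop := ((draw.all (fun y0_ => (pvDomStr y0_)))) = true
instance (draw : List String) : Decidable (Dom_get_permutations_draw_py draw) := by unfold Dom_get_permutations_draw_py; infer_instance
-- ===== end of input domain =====

-- B replaces the per-length itertools.permutations scans by a single level-by-level
-- builder that extends each partial permutation once per remaining element (objective: alternative).

-- ===== PORT A =====
-- itertools.permutations(pool, n), transliterated by its standard recursive meaning:
-- fix each element in order, recurse on the remaining elements.
def pyPermPicks (pool : List String) : List (String × List String) :=
  match pool with
  | [] => []
  | x :: xs => (x, xs) :: (pyPermPicks xs).map (fun p => (p.1, x :: p.2))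

def pyPermutations (pool : List String) : Nat → List (List String)
  | 0 => [[]]
  | n + 1 => (pyPermPicks pool).flatMap (fun p => (pyPermutations p.2 n).map (p.1 :: ·))

def get_permutations_draw_py (draw : List String) : List String :=
  -- for n in range(1, NUM_LETTERS + 1): for xs in permutations(draw, n): my_dict.append(''.join(xs))
  (PySem.List.pyRange 1 (7 + 1) 1).foldl
    (fun my_dict n =>
      (pyPermutations draw n.toNat).foldl
        (fun acc xs => acc ++ [PySem.Str.join "" xs]) my_dict)
    []

-- ===== PORT B =====
-- ext[r] = [(r[i], r[:i] + r[i+1:]) for i in range(len(r))]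
def extListB (r : List String) : List (String × List String) :=
  (PySem.List.pyRange 0 (r.length : Int) 1).map
    (fun i => (PySem.List.pyGetD r i "",
               PySem.List.slice r none (some i) ++ PySem.List.slice r (some (i + 1)) none))

-- for _, r in level: if r not in ext: ext[r] = [...]
def buildExt (level : List (String × List String)) :
    PySem.Dict (List String) (List (String × List String)) :=
  level.foldl
    (fun ext p => if ext.contains p.2 then ext else ext.insert p.2 (extListB p.2))
    PySem.Dict.empty

-- level = [(s + x, r2) for s, r in level for x, r2 in ext[r]]  (ext[r] is always present)
def altStep (level : List (String × List String)) : List (String × List String) :=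
  let ext := buildExt level
  level.flatMap (fun p => (ext.getD p.2 []).map (fun q => (p.1 ++ q.1, q.2)))

def get_permutations_draw_py_alt (draw : List String) : List String :=
  ((List.range 7).foldl
    (fun st _ =>
      let nxt := altStep st.2
      (st.1 ++ nxt.map Prod.fst, nxt))
    (([] : List String), [(("" : String), draw)])).1

-- ===== PRECONDITION & SPEC =====
def Spec_get_permutations_draw_py (draw : List String) (out : List String) : Prop := out = get_permutations_draw_py_alt draw
instance (draw : List String) (out : List String) : Decidable (Spec_get_permutations_draw_py draw out) := by unfold Spec_get_permutations_draw_py; infer_instance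

-- ===== CLAIM (what is proved, stated in full; the proofs are below) =====
def Claim_equal_get_permutations_draw_py : Prop := ∀ (draw : List String), Dom_get_permutations_draw_py draw → Spec_get_permutations_draw_py draw (get_permutations_draw_py draw)

-- ===== LEMMAS AND PROOFS =====

def joinS (xs : List String) : String := PySem.Str.join "" xs

theorem joinS_nil : joinS [] = "" := by
  simp [joinS, PySem.Str.join, PySem.Chars.join_nil]

theorem joinS_cons (x : String) (l : List String) : joinS (x :: l) = x ++ joinS l := by
  cases l with
  | nil => simp [joinS, PySem.Str.join, PySem.Chars.join_singleton, PySem.Chars.join_nil]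
  | cons y ys => simp [joinS, PySem.Str.join, PySem.Chars.join_cons_cons]

-- permutations together with the elements still unused
def permPairs : Nat → List String → List (List String × List String)
  | 0, xs => [([], xs)]
  | n + 1, xs => (pyPermPicks xs).flatMap (fun p => (permPairs n p.2).map (fun q => (p.1 :: q.1, q.2)))

theorem permPairs_fst : ∀ (n : Nat) (xs : List String),
    (permPairs n xs).map Prod.fst = pyPermutations xs n := by
  intro n
  induction n with
  | zero => intro xs; simp [permPairs, pyPermutations]
  | succ n ih =>
    intro xs
    simp [permPairs, pyPermutations, List.map_flatMap, List.map_map, Function.comp_def, ← ih]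

-- the index loop of B produces exactly the recursive picks of A, prefixed by s
theorem picksIdx : ∀ (rem : List String),
    (List.range rem.length).map (fun i => (rem.getD i "", rem.take i ++ rem.drop (i + 1)))
      = pyPermPicks rem := by
  intro rem
  induction rem with
  | nil => simp [pyPermPicks]
  | cons x xs ih =>
    simp only [List.length_cons, List.range_succ_eq_map, List.map_cons, List.map_map, pyPermPicks]
    congr 1
    rw [← ih, List.map_map]
    apply List.map_congr_left
    intro i _
    simp

theorem extListB_eq (r : List String) : extListB r = pyPermPicks r := by
  unfold extListB
  rw [PySem.List.pyRange_one]
  simp only [Int.sub_zero, Int.toNat_natCast, zero_add, List.map_map]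
  rw [← picksIdx r]
  apply List.map_congr_left
  intro i _
  have h3 : PySem.List.slice r (some ((i : Int) + 1)) none = r.drop (i + 1) := by
    rw [show ((i : Int) + 1) = ((i + 1 : Nat) : Int) by push_cast; ring,
      PySem.List.slice_from_natCast]
  simp only [Function.comp_apply, PySem.List.pyGetD_natCast, PySem.List.slice_to_natCast, h3]

theorem buildExt_aux (level : List (String × List String))
    (e0 : PySem.Dict (List String) (List (String × List String)))
    (h0 : ∀ k, e0.contains k = true → e0.getD k [] = extListB k) :
    (∀ k, (level.foldl
        (fun ext p => if ext.contains p.2 then ext else ext.insert p.2 (extListB p.2)) e0).contains k = true →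
      (level.foldl
        (fun ext p => if ext.contains p.2 then ext else ext.insert p.2 (extListB p.2)) e0).getD k [] = extListB k)
    ∧ (∀ k, e0.contains k = true →
        (level.foldl
          (fun ext p => if ext.contains p.2 then ext else ext.insert p.2 (extListB p.2)) e0).contains k = true)
    ∧ (∀ p ∈ level, (level.foldl
        (fun ext p => if ext.contains p.2 then ext else ext.insert p.2 (extListB p.2)) e0).contains p.2 = true) := by
  induction level generalizing e0 with
  | nil => exact ⟨h0, fun k hk => hk, by simp⟩
  | cons p rest ih =>
    simp only [List.foldl_cons]
    by_cases hc : e0.contains p.2 = true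
    · rw [if_pos hc]
      obtain ⟨a, b, c⟩ := ih e0 h0
      exact ⟨a, b, by
        intro q hq
        rcases List.mem_cons.mp hq with h | h
        · exact h ▸ b p.2 hc
        · exact c q h⟩
    · rw [if_neg hc]
      have h1 : ∀ k, (e0.insert p.2 (extListB p.2)).contains k = true →
          (e0.insert p.2 (extListB p.2)).getD k [] = extListB k := by
        intro k hk
        rw [PySem.Dict.getD_insert]
        by_cases hkp : k = p.2
        · rw [if_pos hkp, hkp]
        · rw [if_neg hkp]
          rw [PySem.Dict.contains_insert] at hk
          rw [show (k == p.2) = false by simp [hkp], Bool.false_or] at hk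
          exact h0 k hk
      obtain ⟨a, b, c⟩ := ih _ h1
      refine ⟨a, ?_, ?_⟩
      · intro k hk
        exact b k (by rw [PySem.Dict.contains_insert, hk, Bool.or_true])
      · intro q hq
        rcases List.mem_cons.mp hq with h | h
        · exact h ▸ b p.2 (by rw [PySem.Dict.contains_insert_self])
        · exact c q h
    
theorem altStep_eq (level : List (String × List String)) :
    altStep level = level.flatMap (fun p => (pyPermPicks p.2).map (fun q => (p.1 ++ q.1, q.2))) := by
  unfold altStep
  apply List.flatMap_congr
  intro p hp
  have h0 : ∀ k : List String,
      (PySem.Dict.empty : PySem.Dict (List String) (List (String × List String))).contains k = true →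
      (PySem.Dict.empty : PySem.Dict (List String) (List (String × List String))).getD k [] = extListB k := by
    intro k hk
    rw [PySem.Dict.contains_empty] at hk; exact absurd hk (by simp)
  obtain ⟨a, -, c⟩ := buildExt_aux level _ h0
  rw [show (buildExt level).getD p.2 [] = extListB p.2 from a p.2 (c p hp), extListB_eq]

theorem altStep_iter_flat : ∀ (n : Nat) (lvl : List (String × List String)),
    altStep^[n] lvl = lvl.flatMap (fun p => altStep^[n] [p]) := by
  intro n
  induction n with
  | zero => intro lvl; simp
  | succ n ih =>
    intro lvl
    rw [Function.iterate_succ_apply, altStep_eq lvl, ih, List.flatMap_assoc]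
    apply List.flatMap_congr
    intro p _
    rw [← ih, Function.iterate_succ_apply]
    congr 1
    simp [altStep_eq]

-- the level after n steps from a single seed (s, xs): all length-n permutations,
-- each joined behind s, with its unused elements
theorem altStep_iter_key : ∀ (n : Nat) (s : String) (xs : List String),
    altStep^[n] [(s, xs)] = (permPairs n xs).map (fun q => (s ++ joinS q.1, q.2)) := by
  intro n
  induction n with
  | zero =>
    intro s xs
    simp [permPairs, joinS_nil]
  | succ n ih =>
    intro s xs
    rw [Function.iterate_succ_apply]
    have hstep : altStep [(s, xs)] = (pyPermPicks xs).map (fun q => (s ++ q.1, q.2)) := by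
      simp [altStep_eq]
    rw [hstep, altStep_iter_flat n, List.flatMap_map]
    simp only [permPairs, List.map_flatMap]
    apply List.flatMap_congr
    intro q _
    rw [ih]
    simp only [List.map_map, Function.comp_def, joinS_cons, String.append_assoc]

theorem foldB : ∀ (k : Nat) (out : List String) (lvl : List (String × List String)),
    (List.range k).foldl
      (fun st _ =>
        let nxt := altStep st.2
        (st.1 ++ nxt.map Prod.fst, nxt))
      (out, lvl)
    = (out ++ ((List.range k).map (fun i => (altStep^[i + 1] lvl).map Prod.fst)).flatten,
       altStep^[k] lvl) := by
  intro k
  induction k with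
  | zero => intro out lvl; simp
  | succ k ih =>
    intro out lvl
    rw [List.range_succ, List.foldl_append, ih]
    simp [Function.iterate_succ_apply']

theorem B_closed (draw : List String) :
    get_permutations_draw_py_alt draw
      = (List.range 7).flatMap (fun k => (pyPermutations draw (k + 1)).map joinS) := by
  unfold get_permutations_draw_py_alt
  rw [foldB]
  simp only [List.nil_append, ← List.flatMap_def]
  apply List.flatMap_congr
  intro k _
  rw [altStep_iter_key, List.map_map, ← permPairs_fst, List.map_map]
  apply List.map_congr_left
  intro q _
  simp

theorem A_closed (draw : List String) :
    get_permutations_draw_py draw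
      = (List.range 7).flatMap (fun k => (pyPermutations draw (k + 1)).map joinS) := by
  unfold get_permutations_draw_py
  rw [PySem.List.pyRange_one]
  rw [show ((7 + 1 - 1 : Int)).toNat = 7 by decide]
  rw [List.foldl_map]
  rw [PySem.List.foldl_congr_mem _ _
      (fun acc k => acc ++ (pyPermutations draw (k + 1)).map joinS) [] ?_]
  · rw [PySem.List.foldl_append_eq_flatMap]
    simp
  · intro acc k _
    show (pyPermutations draw ((1 : Int) + (k : Nat)).toNat).foldl
        (fun a xs => a ++ [PySem.Str.join "" xs]) acc
      = acc ++ (pyPermutations draw (k + 1)).map joinS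
    rw [show ((1 : Int) + (k : Nat)).toNat = k + 1 by omega,
      PySem.List.foldl_append_singleton_eq_map]
    rfl

-- ===== VERDICT (by name: the statement is the Claim_ definition above) =====
theorem get_permutations_draw_py_spec : Claim_equal_get_permutations_draw_py := by
  intro draw _
  unfold Spec_get_permutations_draw_py
  rw [A_closed, B_closed]
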